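-- pv_equiv track=rewrite | github.com/TeamGraphix/graphix | graphix/gflow.py | flowaux
-- ===== SOURCE A (Python) =====
-- def flowaux(
--     nodes: set[int],
--     edges: set[tuple[int, int]],
--     input: set[int],
--     output: set[int],
--     v_c: set[int],
--     f: dict[int, set[int]],
--     l_k: dict[int, int],
--     k: int,
-- ):
--     """Function to find one layer of the flow.
--
--     Ref: Mhalla and Perdrix, International Colloquium on Automata,
--     Languages, and Programming (Springer, 2008), pp. 857-868.
--
--     Parameters
--     ----------
--     nodes: set
--         labels of all qubits (nodes)
--     edges: set
--         edges
--     input: set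
--         set of node labels for input
--     output: set
--         set of node labels for output
--     v_c: set
--         correction candidate qubits
--     f: dict
--         flow function. f[i] is the qubit to be measured after qubit i.
--     l_k: dict
--         layers obtained by flow algorithm. l_k[d] is a node set of depth d.
--     k: int
--         current layer number.
--     meas_planes: dict
--         measurement planes for each qubits. meas_planes[i] is the measurement plane for qubit i.
--
--     Outputs
--     -------
--     f: list of nodes
--         causal flow function. f[i] is the qubit to be measured after qubit i.
--     l_k: dict
--         layers obtained by gflow algorithm. l_k[d] is a node set of depth d.
--     """
--     v_out_prime = set()
--     c_prime = set()
--
--     for q in v_c: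
--         N = search_neighbor(q, edges)
--         p_set = N & (nodes - output)
--         if len(p_set) == 1:
--             p = list(p_set)[0]
--             f[p] = {q}
--             l_k[p] = k
--             v_out_prime = v_out_prime | {p}
--             c_prime = c_prime | {q}
--     # determine whether there exists flow
--     if not v_out_prime:
--         if output == nodes:
--             return f, l_k
--         else:
--             return None, None
--     return flowaux(
--         nodes,
--         edges,
--         input,
--         output | v_out_prime,
--         (v_c - c_prime) | (v_out_prime & (nodes - input)),
--         f,
--         l_k,
--         k + 1,
--     )
--
-- def search_neighbor(node: int, edges: set[tuple[int, int]]) -> set[int]: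
--     """Function to find neighborhood of node in edges. This is an ancillary method for `flowaux()`.
--
--     Parameter
--     -------
--     node: int
--         target node number whose neighboring nodes will be collected
--     edges: set of taples
--         set of edges in the graph
--
--     Outputs
--     ------
--     N: list of ints
--         neighboring nodes
--     """
--     N = set()
--     for edge in edges:
--         if node == edge[0]:
--             N = N | {edge[1]}
--         elif node == edge[1]:
--             N = N | {edge[0]}
--     return N
-- ===== SOURCE B (Python) =====
-- def flowaux(
--     nodes: set[int],
--     edges: set[tuple[int, int]],
--     input: set[int],
--     output: set[int],
--     v_c: set[int],
--     f: dict[int, set[int]],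
--     l_k: dict[int, int],
--     k: int,
-- ):
--     """Iterative layer search over a precomputed adjacency index: one pass over
--     edges builds adj, so the per-candidate scan of all edges disappears, and the
--     tail recursion becomes a while-loop. Mutates f and l_k in place like the original."""
--     adj: dict[int, set[int]] = {}
--     for a, b in edges:
--         adj.setdefault(a, set()).add(b)
--         adj.setdefault(b, set()).add(a)
--
--     def single_uncorrected(q: int):
--         # the unique not-yet-corrected neighbor of q, if it is unique
--         cand = [p for p in adj.get(q, ()) if p in nodes and p not in output]
--         return cand[0] if len(cand) == 1 else None
--
--     while True:
--         found = [(q, p) for q in v_c if (p := single_uncorrected(q)) is not None]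
--         if not found:
--             return (f, l_k) if output == nodes else (None, None)
--         for q, p in found:
--             f[p] = {q}
--         for _, p in found:
--             l_k[p] = k
--         ps = {p for _, p in found}
--         output = output | ps
--         v_c = (v_c - {q for q, _ in found}) | {
--             p for p in ps if p in nodes and p not in input
--         }
--         k += 1
-- ===== Notes on version B (the rewrite author's own statement) =====
-- stated objective: faster
-- what changed: B builds one adjacency dictionary from the edges up front so the per-candidate scan of all edges (search_neighbor) disappears, tests candidates by membership (p in nodes and p not in output) through a helper returning the unique uncorrected neighbor or None, and replaces the tail recursion over layers by an iterative while-loop that collects each layer's (q,p) pairs with a comprehension and applies the f and l_k updates in two separate passes.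
import Mathlib
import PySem

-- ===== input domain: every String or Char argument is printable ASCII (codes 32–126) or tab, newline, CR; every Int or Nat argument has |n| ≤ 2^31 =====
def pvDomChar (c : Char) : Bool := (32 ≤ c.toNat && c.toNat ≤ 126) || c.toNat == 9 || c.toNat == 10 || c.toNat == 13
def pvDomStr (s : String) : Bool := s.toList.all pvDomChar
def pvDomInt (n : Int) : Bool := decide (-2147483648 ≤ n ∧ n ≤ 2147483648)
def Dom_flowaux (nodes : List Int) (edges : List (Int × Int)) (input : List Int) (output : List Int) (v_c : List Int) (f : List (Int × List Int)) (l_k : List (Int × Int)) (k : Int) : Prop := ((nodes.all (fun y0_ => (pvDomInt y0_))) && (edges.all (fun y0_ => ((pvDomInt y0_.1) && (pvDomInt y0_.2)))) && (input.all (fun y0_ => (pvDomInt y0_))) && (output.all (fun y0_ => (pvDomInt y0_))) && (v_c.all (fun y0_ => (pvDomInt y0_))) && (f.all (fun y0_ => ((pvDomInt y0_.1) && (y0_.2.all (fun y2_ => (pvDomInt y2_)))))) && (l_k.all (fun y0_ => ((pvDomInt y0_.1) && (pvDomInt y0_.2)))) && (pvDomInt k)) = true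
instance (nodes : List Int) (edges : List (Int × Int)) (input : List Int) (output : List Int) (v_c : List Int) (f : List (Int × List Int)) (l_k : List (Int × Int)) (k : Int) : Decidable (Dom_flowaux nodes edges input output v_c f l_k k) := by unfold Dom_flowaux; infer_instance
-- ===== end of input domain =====

-- B builds one adjacency dictionary from the edges up front (replacing A's per-candidate scan of
-- all edges), tests candidates by membership through a helper returning the unique uncorrected
-- neighbor, and runs the layers as an iterative loop (objective: faster). Both Pythons mutate the
-- argument dicts f and l_k in place in the same way; the equivalence proved here is about the
-- return value.

-- ===== PORT A =====
def searchNeighbor (node : Int) (edges : List (Int × Int)) : PySem.Set Int :=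
  edges.foldl (fun N edge =>
    if node == edge.1 then PySem.Set.union N [edge.2]
    else if node == edge.2 then PySem.Set.union N [edge.1]
    else N) PySem.Set.empty

-- the body of A's 'for q in v_c' loop, on state (v_out_prime, c_prime, f, l_k)
def flowStepA (edges : List (Int × Int)) (nodes output : List Int) (k : Int)
    (st : PySem.Set Int × PySem.Set Int × PySem.Dict Int (List Int) × PySem.Dict Int Int) (q : Int) :
    PySem.Set Int × PySem.Set Int × PySem.Dict Int (List Int) × PySem.Dict Int Int :=
  let N := searchNeighbor q edges
  let p_set := PySem.Set.inter N (PySem.Set.diff nodes output)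
  if PySem.Set.len p_set == 1 then
    -- p = list(p_set)[0]: p_set is a singleton here, so taking its head is exact
    let p := p_set.headD 0
    (PySem.Set.union st.1 [p], PySem.Set.union st.2.1 [q], st.2.2.1.insert p [q], st.2.2.2.insert p k)
  else st

-- termination helper for A: a strict count of survivors (cited by A's decreasing_by)
theorem countP_lt_of_witness (l : List Int) (p q : Int → Bool)
    (hpq : ∀ x ∈ l, p x = true → q x = true)
    (x0 : Int) (hx0 : x0 ∈ l) (hq : q x0 = true) (hp : p x0 = false) :
    l.countP p < l.countP q := by
  induction l with
  | nil => cases hx0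
  | cons a l ih =>
    rcases List.mem_cons.mp hx0 with rfl | hmem
    · have hle : l.countP p ≤ l.countP q :=
        List.countP_mono_left (fun x hx h => hpq x (List.mem_cons_of_mem _ hx) h)
      simp [hq, hp]
      omega
    · have hlt := ih (fun x hx h => hpq x (List.mem_cons_of_mem _ hx) h) hmem
      simp only [List.countP_cons]
      by_cases ha : p a = true
      · have : q a = true := hpq a List.mem_cons_self ha
        simp [ha, this]; omega
      · simp only [Bool.not_eq_true] at ha
        simp [ha]; omega

-- termination helper for A: adding a nonempty batch of fresh nodes to output shrinks nodes - output
theorem measure_lt (nodes output vo : List Int) (hne : vo ≠ [])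
    (hmem : ∀ x ∈ vo, x ∈ nodes ∧ x ∉ output) :
    (PySem.Set.diff nodes (PySem.Set.union output vo)).length
      < (PySem.Set.diff nodes output).length := by
  obtain ⟨x0, hx0⟩ : ∃ x, x ∈ vo := by
    cases vo with
    | nil => exact absurd rfl hne
    | cons a l => exact ⟨a, List.mem_cons_self⟩
  have hx0n := (hmem x0 hx0).1
  have hx0o := (hmem x0 hx0).2
  simp only [PySem.Set.diff, ← List.countP_eq_length_filter]
  refine countP_lt_of_witness _ _ _ ?_ x0 hx0n ?_ ?_
  · intro x _ h
    by_contra hbad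
    have hxo : x ∈ output := (PySem.Set.contains_iff _ _).mp (by simpa using hbad)
    have hmemu : x ∈ PySem.Set.union output vo := (PySem.Set.mem_union _ _ _).mpr (Or.inl hxo)
    have hc := (PySem.Set.contains_iff _ _).mpr hmemu
    simp at h
    exact h.1 hxo
  · have hnc : ¬ PySem.Set.contains output x0 = true :=
      fun hc => hx0o ((PySem.Set.contains_iff _ _).mp hc)
    simpa using hnc
  · have hmemu : x0 ∈ PySem.Set.union output vo := (PySem.Set.mem_union _ _ _).mpr (Or.inr hx0)
    simp
    intro _
    exact hx0

-- elements added to v_out_prime by A's loop lie in nodes - output (cited by A's decreasing_by)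
theorem memA_aux (edges : List (Int × Int)) (nodes output : List Int) (k : Int)
    (v_c : List Int)
    (st : PySem.Set Int × PySem.Set Int × PySem.Dict Int (List Int) × PySem.Dict Int Int)
    (x : Int) (hx : x ∈ (v_c.foldl (flowStepA edges nodes output k) st).1) :
    x ∈ st.1 ∨ (x ∈ nodes ∧ x ∉ output) := by
  induction v_c generalizing st with
  | nil => exact Or.inl hx
  | cons q v_c ih =>
    simp only [List.foldl_cons] at hx
    rcases ih _ hx with h | h
    · unfold flowStepA at h
      by_cases hc : (PySem.Set.len (PySem.Set.inter (searchNeighbor q edges) (PySem.Set.diff nodes output)) == 1) = true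
      · simp only [hc, if_pos] at h
        have hu : PySem.Set.union st.1 [(PySem.Set.inter (searchNeighbor q edges) (PySem.Set.diff nodes output)).headD 0]
            = PySem.Set.add st.1 ((PySem.Set.inter (searchNeighbor q edges) (PySem.Set.diff nodes output)).headD 0) := rfl
        rw [hu, PySem.Set.mem_add] at h
        rcases h with h | h
        · exact Or.inl h
        · set ps := PySem.Set.inter (searchNeighbor q edges) (PySem.Set.diff nodes output) with hps
          have hlen : ps.length = 1 := by
            have h1 : PySem.Set.len ps = 1 := by simpa using hc
            simpa [PySem.Set.len] using h1
          rcases List.length_eq_one_iff.mp hlen with ⟨a, ha⟩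
          have hmem : x ∈ ps := by rw [ha] at h ⊢; simp [h]
          have h2 := (PySem.Set.mem_inter _ _ _).mp hmem
          exact Or.inr ((PySem.Set.mem_diff _ _ _).mp h2.2)
      · rw [if_neg (by simpa using hc)] at h
        exact Or.inl h
    · exact Or.inr h

-- ===== PORT A (main recursion) =====
def flowaux (nodes : List Int) (edges : List (Int × Int)) (input : List Int) (output : List Int) (v_c : List Int) (f : List (Int × List Int)) (l_k : List (Int × Int)) (k : Int) : (Option (List (Int × List Int))) × (Option (List (Int × Int))) :=
  let r := v_c.foldl (flowStepA edges nodes output k)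
    (PySem.Set.empty, PySem.Set.empty, PySem.Dict.mk f, PySem.Dict.mk l_k)
  if h : r.1.isEmpty then
    if PySem.Set.equal output nodes then (some r.2.2.1.items, some r.2.2.2.items)
    else (none, none)
  else
    flowaux nodes edges input (PySem.Set.union output r.1)
      (PySem.Set.union (PySem.Set.diff v_c r.2.1) (PySem.Set.inter r.1 (PySem.Set.diff nodes input)))
      r.2.2.1.items r.2.2.2.items (k + 1)
termination_by (PySem.Set.diff nodes output).length
decreasing_by
  have hval : ¬ (List.foldl (fun s (x : {x // x ∈ v_c}) => flowStepA edges nodes output k s x.1)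
      (PySem.Set.empty, PySem.Set.empty, PySem.Dict.mk f, PySem.Dict.mk l_k) v_c.attach).1.isEmpty = true := h
  rw [List.foldl_attach] at hval ⊢
  apply measure_lt
  · simpa [List.isEmpty_iff] using hval
  · intro x hx
    rcases memA_aux edges nodes output k v_c _ x hx with h' | h'
    · simp [PySem.Set.empty] at h'
    · exact h'

-- ===== PORT B =====
-- adj built from the edges once: adj.setdefault(a, set()).add(b) mutates the set stored at a = Dict.modify
def neighborIndex (edges : List (Int × Int)) : PySem.Dict Int (PySem.Set Int) :=
  edges.foldl (fun adj e =>
    (adj.modify e.1 PySem.Set.empty (fun s => PySem.Set.add s e.2)).modify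
      e.2 PySem.Set.empty (fun s => PySem.Set.add s e.1)) PySem.Dict.empty

-- cand = [p for p in adj.get(q, ()) if p in nodes and p not in output]; cand[0] if len(cand)==1 else None
def singleUncorrected (adj : PySem.Dict Int (PySem.Set Int)) (nodes output : List Int) (q : Int) : Option Int :=
  let cand := (adj.getD q PySem.Set.empty).filter (fun p => nodes.contains p && !(output.contains p))
  if cand.length == 1 then cand.head? else none

-- termination helper for B: whatever singleUncorrected returns is an uncorrected node
theorem single_some_mem (adj : PySem.Dict Int (PySem.Set Int)) (nodes output : List Int) (q p : Int)
    (h : singleUncorrected adj nodes output q = some p) :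
    p ∈ nodes ∧ p ∉ output := by
  unfold singleUncorrected at h
  by_cases hl : (((adj.getD q PySem.Set.empty).filter
      (fun p => nodes.contains p && !(output.contains p))).length == 1) = true
  · rw [if_pos hl] at h
    have hm := List.mem_of_mem_head? (l := (adj.getD q PySem.Set.empty).filter
      (fun p => nodes.contains p && !(output.contains p))) (by rw [h]; exact rfl)
    have hpm := (List.mem_filter.mp hm).2
    simpa using hpm
  · rw [if_neg hl] at h
    cases h

-- termination helper for B: growing output strictly shrinks the uncorrected filter
theorem altMeasure_lt (nodes output out' : List Int) (p0 : Int)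
    (hmono : ∀ x : Int, x ∈ output → x ∈ out')
    (hp0n : p0 ∈ nodes) (hp0o : p0 ∉ output) (hp0' : p0 ∈ out') :
    (nodes.filter (fun x => !(out'.contains x))).length
      < (nodes.filter (fun x => !(output.contains x))).length := by
  have hsub : List.Sublist (nodes.filter (fun x => !(out'.contains x)))
      (nodes.filter (fun x => !(output.contains x))) := by
    apply List.monotone_filter_right
    intro a ha
    have h1 : a ∉ out' := by simpa using ha
    have h2 : a ∉ output := fun hm => h1 (hmono a hm)
    simpa using h2
  refine lt_of_le_of_ne hsub.length_le (fun hlen => ?_)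
  have heq := hsub.eq_of_length hlen
  have h1 : p0 ∈ nodes.filter (fun x => !(output.contains x)) :=
    List.mem_filter.mpr ⟨hp0n, by simpa using hp0o⟩
  rw [← heq] at h1
  have h2 := (List.mem_filter.mp h1).2
  simp at h2
  exact h2 hp0'

-- the 'while True' loop of B
def flowauxIter (adj : PySem.Dict Int (PySem.Set Int)) (nodes input : List Int)
    (output v_c : List Int) (fd : PySem.Dict Int (List Int)) (ld : PySem.Dict Int Int) (k : Int) :
    (Option (List (Int × List Int))) × (Option (List (Int × Int))) :=
  let found := v_c.filterMap (fun q => (singleUncorrected adj nodes output q).map (fun p => (q, p)))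
  if hfe : found.isEmpty then
    if PySem.Set.equal output nodes then (some fd.items, some ld.items) else (none, none)
  else
    let fd' := found.foldl (fun d qp => d.insert qp.2 [qp.1]) fd
    let ld' := found.foldl (fun d qp => d.insert qp.2 k) ld
    let ps : PySem.Set Int := PySem.Set.ofList (found.map Prod.snd)
    flowauxIter adj nodes input (PySem.Set.union output ps)
      (PySem.Set.union (PySem.Set.diff v_c (PySem.Set.ofList (found.map Prod.fst)))
        (PySem.Set.ofList (ps.filter (fun p => nodes.contains p && !(input.contains p)))))
      fd' ld' (k + 1)
termination_by (nodes.filter (fun x => !(output.contains x))).length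
decreasing_by
  have hne : ¬ found = [] := by simpa [List.isEmpty_iff] using hfe
  obtain ⟨qp, hqp⟩ : ∃ qp, qp ∈ found := by
    cases hC : found with
    | nil => exact absurd hC hne
    | cons a t => exact ⟨a, List.mem_cons_self⟩
  obtain ⟨x0, hx0, hmap⟩ := List.mem_filterMap.mp hqp
  obtain ⟨q0, hq0⟩ := x0
  obtain ⟨p0, hsingle, hpair⟩ := Option.map_eq_some_iff.mp hmap
  obtain ⟨hp0n, hp0o⟩ := single_some_mem adj nodes output q0 p0 hsingle
  apply altMeasure_lt _ _ _ p0
  · intro x hx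
    exact (PySem.Set.mem_union _ _ _).mpr (Or.inl hx)
  · exact hp0n
  · exact hp0o
  · refine (PySem.Set.mem_union _ _ _).mpr (Or.inr ?_)
    refine (PySem.Set.mem_ofList _ _).mpr (List.mem_map.mpr ⟨qp, hqp, ?_⟩)
    rw [← hpair]

def flowaux_alt (nodes : List Int) (edges : List (Int × Int)) (input : List Int) (output : List Int) (v_c : List Int) (f : List (Int × List Int)) (l_k : List (Int × Int)) (k : Int) : (Option (List (Int × List Int))) × (Option (List (Int × Int))) :=
  flowauxIter (neighborIndex edges) nodes input output v_c (PySem.Dict.mk f) (PySem.Dict.mk l_k) k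

-- ===== PRECONDITION & SPEC =====
def Spec_flowaux (nodes : List Int) (edges : List (Int × Int)) (input : List Int) (output : List Int) (v_c : List Int) (f : List (Int × List Int)) (l_k : List (Int × Int)) (k : Int) (out : (Option (List (Int × List Int))) × (Option (List (Int × Int)))) : Prop := out = flowaux_alt nodes edges input output v_c f l_k k
instance (nodes : List Int) (edges : List (Int × Int)) (input : List Int) (output : List Int) (v_c : List Int) (f : List (Int × List Int)) (l_k : List (Int × Int)) (k : Int) (out : (Option (List (Int × List Int))) × (Option (List (Int × Int)))) : Decidable (Spec_flowaux nodes edges input output v_c f l_k k out) := by unfold Spec_flowaux; infer_instance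

-- ===== CLAIM (what is proved, stated in full; the proofs are below) =====
def Claim_equal_flowaux : Prop := ∀ (nodes : List Int) (edges : List (Int × Int)) (input : List Int) (output : List Int) (v_c : List Int) (f : List (Int × List Int)) (l_k : List (Int × Int)) (k : Int), Dom_flowaux nodes edges input output v_c f l_k k → Spec_flowaux nodes edges input output v_c f l_k k (flowaux nodes edges input output v_c f l_k k)

-- ===== LEMMAS AND PROOFS =====

-- the adjacency dictionary looks up exactly what search_neighbor computes
theorem adj_getD (edges : List (Int × Int)) (q : Int) :
    (neighborIndex edges).getD q PySem.Set.empty = searchNeighbor q edges := by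
  have gen : ∀ (l : List (Int × Int)) (d : PySem.Dict Int (PySem.Set Int)),
      (l.foldl (fun adj e =>
          (adj.modify e.1 PySem.Set.empty (fun s => PySem.Set.add s e.2)).modify
            e.2 PySem.Set.empty (fun s => PySem.Set.add s e.1)) d).getD q PySem.Set.empty
      = l.foldl (fun N edge =>
          if q == edge.1 then PySem.Set.union N [edge.2]
          else if q == edge.2 then PySem.Set.union N [edge.1]
          else N) (d.getD q PySem.Set.empty) := by
    intro l
    induction l with
    | nil => intro d; rfl
    | cons e l ih =>
      intro d
      obtain ⟨a, b⟩ := e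
      simp only [List.foldl_cons]
      rw [ih]
      congr 1
      rw [PySem.Dict.getD_modify, PySem.Dict.getD_modify]
      have hu : ∀ (s : PySem.Set Int) (x : Int), PySem.Set.union s [x] = PySem.Set.add s x :=
        fun _ _ => rfl
      by_cases h1 : q = a
      · subst h1
        by_cases h2 : q = b
        · subst h2
          simp only [beq_self_eq_true, if_true, hu]
          exact PySem.Set.add_of_mem ((PySem.Set.mem_add _ _ _).mpr (Or.inr rfl))
        · simp [h2, hu]
      · by_cases h2 : q = b
        · subst h2
          simp [h1, hu]
        · simp [PySem.Dict.getD_modify, h1, h2]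
  rw [neighborIndex, searchNeighbor, gen]
  rfl

-- B's membership filter computes A's p_set
theorem cand_eq (edges : List (Int × Int)) (nodes output : List Int) (q : Int) :
    (((neighborIndex edges).getD q PySem.Set.empty).filter
        (fun p => nodes.contains p && !(output.contains p)))
      = PySem.Set.inter (searchNeighbor q edges) (PySem.Set.diff nodes output) := by
  rw [adj_getD]
  simp only [PySem.Set.inter, PySem.Set.diff]
  apply List.filter_congr
  intro p _
  cases hn : nodes.contains p with
  | false =>
    have hpn : p ∉ nodes := by simpa using hn
    have hnm : p ∉ List.filter (fun x => !PySem.Set.contains output x) nodes :=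
      fun hm => hpn (List.mem_filter.mp hm).1
    cases hc : PySem.Set.contains (List.filter (fun x => !PySem.Set.contains output x) nodes) p with
    | false => simp
    | true => exact absurd ((PySem.Set.contains_iff _ _).mp hc) hnm
  | true =>
    simp only [Bool.true_and]
    cases ho : output.contains p with
    | false =>
      have hno : p ∉ output := by simpa using ho
      have hmf : p ∈ List.filter (fun x => !PySem.Set.contains output x) nodes := by
        refine List.mem_filter.mpr ⟨by simpa using hn, ?_⟩
        simpa [PySem.Set.contains] using hno
      simp
      exact ⟨by simpa using hn, hno⟩
    | true =>
      have hmem : p ∈ output := by simpa using ho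
      have hnm : p ∉ List.filter (fun x => !PySem.Set.contains output x) nodes := by
        intro hm
        have h2 := (List.mem_filter.mp hm).2
        have h3 : p ∉ output := by simpa [PySem.Set.contains] using h2
        exact h3 hmem
      cases hc : PySem.Set.contains (List.filter (fun x => !PySem.Set.contains output x) nodes) p with
      | false => simp
      | true => exact absurd ((PySem.Set.contains_iff _ _).mp hc) hnm

-- B's helper as A's singleton test on p_set
theorem single_eq (edges : List (Int × Int)) (nodes output : List Int) (q : Int) :
    singleUncorrected (neighborIndex edges) nodes output q
      = (if PySem.Set.len (PySem.Set.inter (searchNeighbor q edges) (PySem.Set.diff nodes output)) == 1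
         then some ((PySem.Set.inter (searchNeighbor q edges) (PySem.Set.diff nodes output)).headD 0)
         else none) := by
  unfold singleUncorrected
  rw [cand_eq]
  set ps := PySem.Set.inter (searchNeighbor q edges) (PySem.Set.diff nodes output) with hps
  show (if (ps.length == 1) = true then ps.head? else none)
      = (if PySem.Set.len ps == 1 then some (ps.headD 0) else none)
  by_cases h1 : ps.length = 1
  · rcases List.length_eq_one_iff.mp h1 with ⟨a, ha⟩
    rw [ha]
    simp [PySem.Set.len]
  · have hb1 : (ps.length == 1) = false := by simpa using h1
    have hb2 : (PySem.Set.len ps == 1) = false := by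
      simpa [PySem.Set.len] using h1
    simp [hb1]
    exact h1

-- the layer's (candidate, corrected-node) pairs as A computes them, in v_c order
def layerA (edges : List (Int × Int)) (nodes output v_c : List Int) : List (Int × Int) :=
  (v_c.filter (fun q => PySem.Set.len (PySem.Set.inter (searchNeighbor q edges) (PySem.Set.diff nodes output)) == 1)).map
    (fun q => (q, (PySem.Set.inter (searchNeighbor q edges) (PySem.Set.diff nodes output)).headD 0))

-- B's comprehension computes exactly those pairs
theorem found_eq (edges : List (Int × Int)) (nodes output v_c : List Int) :
    v_c.filterMap (fun q => (singleUncorrected (neighborIndex edges) nodes output q).map (fun p => (q, p)))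
      = layerA edges nodes output v_c := by
  unfold layerA
  induction v_c with
  | nil => rfl
  | cons q v_c ih =>
    simp only [single_eq] at ih
    simp only [List.filterMap_cons, List.filter_cons, single_eq]
    by_cases hc : (PySem.Set.len (PySem.Set.inter (searchNeighbor q edges) (PySem.Set.diff nodes output)) == 1) = true
    · simp only [hc, if_pos, Option.map_some, List.map_cons]
      rw [ih]
    · simp only [if_neg hc, Option.map_none]
      exact ih

-- A's layer loop computed from those pairs
theorem foldA_eq (edges : List (Int × Int)) (nodes output : List Int) (k : Int) (v_c : List Int)
    (vo cp : PySem.Set Int) (fd : PySem.Dict Int (List Int)) (ld : PySem.Dict Int Int) :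
    v_c.foldl (flowStepA edges nodes output k) (vo, cp, fd, ld)
    = (PySem.Set.update vo ((layerA edges nodes output v_c).map Prod.snd),
       PySem.Set.update cp ((layerA edges nodes output v_c).map Prod.fst),
       (layerA edges nodes output v_c).foldl (fun d qp => d.insert qp.2 [qp.1]) fd,
       (layerA edges nodes output v_c).foldl (fun d qp => d.insert qp.2 k) ld) := by
  unfold layerA
  induction v_c generalizing vo cp fd ld with
  | nil => rfl
  | cons q v_c ih =>
    simp only [List.foldl_cons, List.filter_cons]
    by_cases hc : (PySem.Set.len (PySem.Set.inter (searchNeighbor q edges) (PySem.Set.diff nodes output)) == 1) = true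
    · rw [if_pos hc]
      have hstep : flowStepA edges nodes output k (vo, cp, fd, ld) q
          = (PySem.Set.add vo ((PySem.Set.inter (searchNeighbor q edges) (PySem.Set.diff nodes output)).headD 0),
             PySem.Set.add cp q,
             fd.insert ((PySem.Set.inter (searchNeighbor q edges) (PySem.Set.diff nodes output)).headD 0) [q],
             ld.insert ((PySem.Set.inter (searchNeighbor q edges) (PySem.Set.diff nodes output)).headD 0) k) := by
        unfold flowStepA
        simp only [hc, if_pos]
        rfl
      rw [hstep, ih]
      simp only [List.map_cons, List.foldl_cons, PySem.Set.update_cons]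
    · rw [if_neg hc]
      have hstep : flowStepA edges nodes output k (vo, cp, fd, ld) q = (vo, cp, fd, ld) := by
        unfold flowStepA
        simp only [if_neg hc]
      rw [hstep, ih]

theorem contains_diff (nodes input : List Int) (p : Int) :
    PySem.Set.contains (PySem.Set.diff nodes input) p = (nodes.contains p && !(input.contains p)) := by
  cases hn : nodes.contains p with
  | false =>
    have hpn : p ∉ nodes := by simpa using hn
    have hnm : p ∉ PySem.Set.diff nodes input :=
      fun hm => hpn ((PySem.Set.mem_diff _ _ _).mp hm).1
    cases hc : PySem.Set.contains (PySem.Set.diff nodes input) p with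
    | false => simp
    | true => exact absurd ((PySem.Set.contains_iff _ _).mp hc) hnm
  | true =>
    simp only [Bool.true_and]
    cases hi : input.contains p with
    | false =>
      have hm : p ∈ PySem.Set.diff nodes input :=
        (PySem.Set.mem_diff _ _ _).mpr ⟨by simpa using hn, by simpa using hi⟩
      simp
      exact ⟨by simpa using hn, by simpa using hi⟩
    | true =>
      have hmI : p ∈ input := by simpa using hi
      have hnm : p ∉ PySem.Set.diff nodes input :=
        fun hm => ((PySem.Set.mem_diff _ _ _).mp hm).2 hmI
      cases hc : PySem.Set.contains (PySem.Set.diff nodes input) p with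
      | false => simp
      | true => exact absurd ((PySem.Set.contains_iff _ _).mp hc) hnm

-- A's 'v_out_prime & (nodes - input)' as B's filtered comprehension over ps
theorem inter_ofList_filter (L nodes input : List Int) :
    PySem.Set.inter (PySem.Set.ofList L) (PySem.Set.diff nodes input)
      = PySem.Set.ofList ((PySem.Set.ofList L).filter (fun p => nodes.contains p && !(input.contains p))) := by
  have h1 : PySem.Set.inter (PySem.Set.ofList L) (PySem.Set.diff nodes input)
      = (PySem.Set.ofList L).filter (fun p => nodes.contains p && !(input.contains p)) := by
    simp only [PySem.Set.inter]
    exact List.filter_congr (fun p _ => contains_diff nodes input p)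
  have hnd : ((PySem.Set.ofList L).filter (fun p => nodes.contains p && !(input.contains p))).Nodup :=
    List.Nodup.filter _ (PySem.Set.nodup_ofList L)
  rw [h1, PySem.Set.ofList_eq_self_of_nodup _ hnd]

theorem ofList_isEmpty (l : List Int) : (PySem.Set.ofList l).isEmpty = l.isEmpty := by
  cases l with
  | nil => rfl
  | cons a t => simp [PySem.Set.ofList_cons]

theorem main_eq (nodes : List Int) (edges : List (Int × Int)) (input : List Int)
    (output v_c : List Int) (f : List (Int × List Int)) (l_k : List (Int × Int)) (k : Int) :
    flowaux nodes edges input output v_c f l_k k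
    = flowauxIter (neighborIndex edges) nodes input output v_c (PySem.Dict.mk f) (PySem.Dict.mk l_k) k := by
  induction output, v_c, f, l_k, k using flowaux.induct nodes edges input with
  | case1 output v_c f l_k k r hA hB =>
    have hr0 : r = List.foldl (flowStepA edges nodes output k)
        (PySem.Set.empty, PySem.Set.empty, PySem.Dict.mk f, PySem.Dict.mk l_k) v_c := by
      have h0 : r = List.foldl (fun s (x : {x // x ∈ v_c}) => flowStepA edges nodes output k s x.1)
          (PySem.Set.empty, PySem.Set.empty, PySem.Dict.mk f, PySem.Dict.mk l_k) v_c.attach := rfl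
      rw [h0, List.foldl_attach]
    have hr : r = (PySem.Set.ofList ((layerA edges nodes output v_c).map Prod.snd),
        PySem.Set.ofList ((layerA edges nodes output v_c).map Prod.fst),
        (layerA edges nodes output v_c).foldl (fun d qp => d.insert qp.2 [qp.1]) (PySem.Dict.mk f),
        (layerA edges nodes output v_c).foldl (fun d qp => d.insert qp.2 k) (PySem.Dict.mk l_k)) := by
      rw [hr0, foldA_eq]; rfl
    have hP : layerA edges nodes output v_c = [] := by
      have h1 := hA
      rw [hr] at h1
      simp only [ofList_isEmpty, List.isEmpty_map, List.isEmpty_iff] at h1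
      exact h1
    rw [flowaux, ← hr0, dif_pos hA, if_pos hB, flowauxIter]
    rw [dif_pos (by simp [found_eq, hP])]
    rw [if_pos hB, hr, hP]
    rfl
  | case2 output v_c f l_k k r hA hB =>
    have hr0 : r = List.foldl (flowStepA edges nodes output k)
        (PySem.Set.empty, PySem.Set.empty, PySem.Dict.mk f, PySem.Dict.mk l_k) v_c := by
      have h0 : r = List.foldl (fun s (x : {x // x ∈ v_c}) => flowStepA edges nodes output k s x.1)
          (PySem.Set.empty, PySem.Set.empty, PySem.Dict.mk f, PySem.Dict.mk l_k) v_c.attach := rfl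
      rw [h0, List.foldl_attach]
    have hr : r = (PySem.Set.ofList ((layerA edges nodes output v_c).map Prod.snd),
        PySem.Set.ofList ((layerA edges nodes output v_c).map Prod.fst),
        (layerA edges nodes output v_c).foldl (fun d qp => d.insert qp.2 [qp.1]) (PySem.Dict.mk f),
        (layerA edges nodes output v_c).foldl (fun d qp => d.insert qp.2 k) (PySem.Dict.mk l_k)) := by
      rw [hr0, foldA_eq]; rfl
    have hP : layerA edges nodes output v_c = [] := by
      have h1 := hA
      rw [hr] at h1
      simp only [ofList_isEmpty, List.isEmpty_map, List.isEmpty_iff] at h1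
      exact h1
    rw [flowaux, ← hr0, dif_pos hA, if_neg hB, flowauxIter]
    rw [dif_pos (by simp [found_eq, hP])]
    rw [if_neg hB]
  | case3 output v_c f l_k k r hA ih =>
    have hr0 : r = List.foldl (flowStepA edges nodes output k)
        (PySem.Set.empty, PySem.Set.empty, PySem.Dict.mk f, PySem.Dict.mk l_k) v_c := by
      have h0 : r = List.foldl (fun s (x : {x // x ∈ v_c}) => flowStepA edges nodes output k s x.1)
          (PySem.Set.empty, PySem.Set.empty, PySem.Dict.mk f, PySem.Dict.mk l_k) v_c.attach := rfl
      rw [h0, List.foldl_attach]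
    have hr : r = (PySem.Set.ofList ((layerA edges nodes output v_c).map Prod.snd),
        PySem.Set.ofList ((layerA edges nodes output v_c).map Prod.fst),
        (layerA edges nodes output v_c).foldl (fun d qp => d.insert qp.2 [qp.1]) (PySem.Dict.mk f),
        (layerA edges nodes output v_c).foldl (fun d qp => d.insert qp.2 k) (PySem.Dict.mk l_k)) := by
      rw [hr0, foldA_eq]; rfl
    have hPne : ¬ (layerA edges nodes output v_c).isEmpty = true := by
      intro hP
      apply hA
      rw [hr]
      simp [List.isEmpty_iff.mp hP]
    rw [flowaux, ← hr0, dif_neg hA, flowauxIter]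
    rw [dif_neg (by simpa [found_eq] using hPne)]
    rw [ih, hr, found_eq, inter_ofList_filter]

-- ===== VERDICT (by name: the statement is the Claim_ definition above) =====
theorem flowaux_spec : Claim_equal_flowaux := by
  intro nodes edges input output v_c f l_k k _
  unfold Spec_flowaux flowaux_alt
  exact main_eq nodes edges input output v_c f l_k k
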